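-- pv_equiv track=rewrite | github.com/kryggird/sudoku_solver | gen_tables.py | gen_mask
-- ===== SOURCE A (Python) =====
-- from math import ceil
--
-- def gen_idxs(idx):
--     row = (idx // 9)
--     col = idx % 9
--
--     row_start = row * 9
--     col_start = col
--
--     square_row = (row // 3) * 3
--     square_col = (col // 3) * 3
--     square_start = square_row * 9 + square_col
--
--     row_idxs = [i for i in range(row_start, row_start + 9) if i != idx]
--     col_idxs = [i for i in range(col_start, 81, 9) if i != idx]
--     square_idxs = [square_start + shift for shift in [0, 1, 2, 9, 10, 11, 18, 19, 20]]
--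
--     return row_idxs + col_idxs + [i for i in square_idxs if i not in row_idxs + col_idxs and i != idx]
--
-- def gen_mask(idx, count, alignment=None):
--     if alignment is not None:
--         aligned_count = int(ceil(count / alignment)) * alignment
--     else:
--         aligned_count = count
--     idxs = gen_idxs(idx)
--
--     elems = [0xFFFF if (i in idxs) else 0 for i in range(aligned_count)]
--     return elems
-- ===== SOURCE B (Python) =====
-- def gen_mask(idx, count, alignment=None):
--     if alignment is not None:
--         aligned_count = -(-count // alignment) * alignment  # integer ceil division
--     else:
--         aligned_count = count
--     row, col = divmod(idx, 9)
--     row_start = row * 9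
--     square_start = (row // 3) * 27 + (col // 3) * 3
--     out = []
--     for i in range(aligned_count):
--         d = i - square_start
--         peer = i != idx and (
--             row_start <= i < row_start + 9
--             or (i % 9 == col and col <= i < 81)
--             or (0 <= d <= 20 and d % 9 <= 2)
--         )
--         out.append(0xFFFF if peer else 0)
--     return out
-- ===== Notes on version B (the rewrite author's own statement) =====
-- stated objective: faster
-- what changed: B never builds the peer-index list: each cell of the mask is decided by an O(1) arithmetic row/column/box test (derived from idx's row, column and box start), replacing A's membership scan of the ~27-element list built by gen_idxs for every position; the float ceil round-trip is replaced by integer ceiling division.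
import Mathlib
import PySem

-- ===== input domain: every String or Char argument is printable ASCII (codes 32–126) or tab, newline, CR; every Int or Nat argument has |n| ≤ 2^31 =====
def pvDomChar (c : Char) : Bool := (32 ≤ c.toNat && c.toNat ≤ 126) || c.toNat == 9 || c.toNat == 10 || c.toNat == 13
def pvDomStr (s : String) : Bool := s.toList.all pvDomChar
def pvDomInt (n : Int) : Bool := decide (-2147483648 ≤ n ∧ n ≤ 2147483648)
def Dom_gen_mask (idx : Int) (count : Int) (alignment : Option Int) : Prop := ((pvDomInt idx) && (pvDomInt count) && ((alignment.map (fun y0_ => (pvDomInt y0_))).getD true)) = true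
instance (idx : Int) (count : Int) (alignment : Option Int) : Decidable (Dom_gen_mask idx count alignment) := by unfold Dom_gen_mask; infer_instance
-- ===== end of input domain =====

-- B drops the peer-index lists entirely: each cell's mask value is decided by an O(1)
-- arithmetic row/column/box test, instead of A's membership scan of a built peer list.

-- ===== PORT A =====
-- module helper of Source A, used only by A's port
def gen_idxs (idx : Int) : List Int :=
  let row := PySem.Int.floordiv idx 9
  let col := PySem.Int.mod idx 9
  let row_start := row * 9
  let col_start := col
  let square_row := (PySem.Int.floordiv row 3) * 3
  let square_col := (PySem.Int.floordiv col 3) * 3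
  let square_start := square_row * 9 + square_col
  let row_idxs := (PySem.List.pyRange row_start (row_start + 9) 1).filter (fun i => i != idx)
  let col_idxs := (PySem.List.pyRange col_start 81 9).filter (fun i => i != idx)
  let square_idxs := ([0, 1, 2, 9, 10, 11, 18, 19, 20] : List Int).map (fun shift => square_start + shift)
  row_idxs ++ col_idxs ++ square_idxs.filter (fun i => !(row_idxs ++ col_idxs).contains i && i != idx)

-- A computes int(ceil(count / alignment)) * alignment with float division; for
-- |count|, |alignment| ≤ 2^31 (Dom) the float round-trip is exact and equals the
-- integer ceiling division -((-count) // alignment), which is how it is ported.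
def gen_mask (idx : Int) (count : Int) (alignment : Option Int) : List Int :=
  let aligned_count : Int :=
    match alignment with
    | some a => -(PySem.Int.floordiv (-count) a) * a
    | none => count
  let idxs := gen_idxs idx
  (PySem.List.pyRange 0 aligned_count 1).map (fun i => if idxs.contains i then (0xFFFF : Int) else 0)

-- ===== PORT B =====
def gen_mask_alt (idx : Int) (count : Int) (alignment : Option Int) : List Int :=
  let aligned_count : Int :=
    match alignment with
    | some a => -(PySem.Int.floordiv (-count) a) * a
    | none => count
  let row := PySem.Int.floordiv idx 9
  let col := PySem.Int.mod idx 9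
  let row_start := row * 9
  let square_start := (PySem.Int.floordiv row 3) * 27 + (PySem.Int.floordiv col 3) * 3
  (PySem.List.pyRange 0 aligned_count 1).foldl
    (fun out i =>
      let d := i - square_start
      let peer : Bool := i != idx &&
        ((row_start ≤ i && i < row_start + 9)
          || (PySem.Int.mod i 9 == col && col ≤ i && i < 81)
          || (0 ≤ d && d ≤ 20 && PySem.Int.mod d 9 ≤ 2))
      out ++ [if peer then (0xFFFF : Int) else 0])
    []

-- ===== PRECONDITION & SPEC =====
-- Pre_ excludes exactly alignment == 0, where both Pythons raise ZeroDivisionError.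
def Pre_gen_mask (idx : Int) (count : Int) (alignment : Option Int) : Prop :=
  alignment ≠ some 0
instance (idx : Int) (count : Int) (alignment : Option Int) : Decidable (Pre_gen_mask idx count alignment) := by unfold Pre_gen_mask; infer_instance

def pvWitness_gen_mask : Int × Int × Option Int := (40, 81, some 16)

def Spec_gen_mask (idx : Int) (count : Int) (alignment : Option Int) (out : List Int) : Prop := out = gen_mask_alt idx count alignment
instance (idx : Int) (count : Int) (alignment : Option Int) (out : List Int) : Decidable (Spec_gen_mask idx count alignment out) := by unfold Spec_gen_mask; infer_instance

-- ===== CLAIM (what is proved, stated in full; the proofs are below) =====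
def Claim_equal_gen_mask : Prop := ∀ (idx : Int) (count : Int) (alignment : Option Int), Dom_gen_mask idx count alignment → Pre_gen_mask idx count alignment → Spec_gen_mask idx count alignment (gen_mask idx count alignment)

-- ===== LEMMAS AND PROOFS =====

-- the arithmetic peer test of B agrees with membership in A's built peer list
lemma pv_peer_iff (idx i : Int) :
    (gen_idxs idx).contains i =
      (i != idx &&
        ((PySem.Int.floordiv idx 9 * 9 ≤ i && i < PySem.Int.floordiv idx 9 * 9 + 9)
          || (PySem.Int.mod i 9 == PySem.Int.mod idx 9 && PySem.Int.mod idx 9 ≤ i && i < 81)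
          || (0 ≤ i - (PySem.Int.floordiv (PySem.Int.floordiv idx 9) 3 * 27 + PySem.Int.floordiv (PySem.Int.mod idx 9) 3 * 3)
              && i - (PySem.Int.floordiv (PySem.Int.floordiv idx 9) 3 * 27 + PySem.Int.floordiv (PySem.Int.mod idx 9) 3 * 3) ≤ 20
              && PySem.Int.mod (i - (PySem.Int.floordiv (PySem.Int.floordiv idx 9) 3 * 27 + PySem.Int.floordiv (PySem.Int.mod idx 9) 3 * 3)) 9 ≤ 2))) := by
  have h1 := PySem.Int.floordiv_mul_add_mod idx 9
  have h2 := PySem.Int.mod_nonneg idx (by norm_num : (0:Int) < 9)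
  have h3 := PySem.Int.mod_lt idx (by norm_num : (0:Int) < 9)
  have h4 := PySem.Int.floordiv_mul_add_mod (PySem.Int.floordiv idx 9) 3
  have h5 := PySem.Int.mod_nonneg (PySem.Int.floordiv idx 9) (by norm_num : (0:Int) < 3)
  have h6 := PySem.Int.mod_lt (PySem.Int.floordiv idx 9) (by norm_num : (0:Int) < 3)
  have h7 := PySem.Int.floordiv_mul_add_mod (PySem.Int.mod idx 9) 3
  have h8 := PySem.Int.mod_nonneg (PySem.Int.mod idx 9) (by norm_num : (0:Int) < 3)
  have h9 := PySem.Int.mod_lt (PySem.Int.mod idx 9) (by norm_num : (0:Int) < 3)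
  have h10 := PySem.Int.floordiv_mul_add_mod i 9
  have h11 := PySem.Int.mod_nonneg i (by norm_num : (0:Int) < 9)
  have h12 := PySem.Int.mod_lt i (by norm_num : (0:Int) < 9)
  have h13 := PySem.Int.floordiv_mul_add_mod (i - (PySem.Int.floordiv (PySem.Int.floordiv idx 9) 3 * 27 + PySem.Int.floordiv (PySem.Int.mod idx 9) 3 * 3)) 9
  have h14 := PySem.Int.mod_nonneg (i - (PySem.Int.floordiv (PySem.Int.floordiv idx 9) 3 * 27 + PySem.Int.floordiv (PySem.Int.mod idx 9) 3 * 3)) (by norm_num : (0:Int) < 9)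
  have h15 := PySem.Int.mod_lt (i - (PySem.Int.floordiv (PySem.Int.floordiv idx 9) 3 * 27 + PySem.Int.floordiv (PySem.Int.mod idx 9) 3 * 3)) (by norm_num : (0:Int) < 9)
  rw [Bool.eq_iff_iff]
  simp only [gen_idxs, List.contains_eq_mem, List.map_cons, List.map_nil, List.mem_append,
    List.mem_filter, List.mem_cons, List.not_mem_nil,
    PySem.List.mem_pyRange_one, PySem.List.mem_pyRange_iff_of_pos (by norm_num : (0:Int) < 9),
    decide_eq_true_eq, Bool.and_eq_true, Bool.or_eq_true,
    bne_iff_ne, ne_eq, Bool.not_eq_true', decide_eq_false_iff_not, beq_iff_eq]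
  constructor
  · rintro ((⟨⟨hle, hlt⟩, hne⟩ | ⟨⟨hle, hlt, hdvd⟩, hne⟩) | ⟨hs, hnm, hne⟩)
    · exact ⟨hne, by omega⟩
    · exact ⟨hne, by omega⟩
    · refine ⟨hne, Or.inr ?_⟩
      rcases hs with h | h | h | h | h | h | h | h | h | h
      · omega
      · omega
      · omega
      · omega
      · omega
      · omega
      · omega
      · omega
      · omega
      · exact h.elim
  · rintro ⟨hne, ((⟨hle, hlt⟩ | ⟨⟨hm, hle⟩, hlt⟩) | ⟨⟨hd0, hd20⟩, hdm⟩)⟩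
    · exact Or.inl (Or.inl ⟨⟨hle, hlt⟩, hne⟩)
    · refine Or.inl (Or.inr ⟨⟨hle, hlt, ?_⟩, hne⟩); omega
    · by_cases hr : PySem.Int.floordiv idx 9 * 9 ≤ i ∧ i < PySem.Int.floordiv idx 9 * 9 + 9
      · exact Or.inl (Or.inl ⟨hr, hne⟩)
      · by_cases hc : PySem.Int.mod idx 9 ≤ i ∧ i < 81 ∧ 9 ∣ i - PySem.Int.mod idx 9
        · exact Or.inl (Or.inr ⟨hc, hne⟩)
        · refine Or.inr ⟨?_, ?_, hne⟩ <;> omega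

-- a map over a range equals the append-accumulator loop of B over the same range
lemma pv_fold_append_eq_map (L : List Int) (f : Int → Int) :
    L.foldl (fun out i => out ++ [f i]) [] = L.map f := by
  suffices h : ∀ acc : List Int, L.foldl (fun out i => out ++ [f i]) acc = acc ++ L.map f by
    simpa using h []
  induction L with
  | nil => intro acc; simp
  | cons x L ih => intro acc; simp [ih, List.append_assoc]


-- ===== VERDICT (by name: the statement is the Claim_ definition above) =====
theorem gen_mask_spec : Claim_equal_gen_mask := by
  intro idx count alignment _hdom _hpre
  simp only [Spec_gen_mask, gen_mask, gen_mask_alt]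
  rw [pv_fold_append_eq_map]
  refine List.map_congr_left ?_
  intro i _
  rw [pv_peer_iff idx i]
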